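-- pv_equiv track=rewrite | github.com/Push1413/aoc-py | 2015/day14/Day14B.py | simulateRace
-- ===== SOURCE A (Python) =====
-- def calculateDistance(speed, fly_time, rest_time, elapsed_time):
--     # Calculate the distance traveled by a reindeer at a given elapsed time
--     cycle_time = fly_time + rest_time
--     full_cycles = elapsed_time // cycle_time
--     remaining_time = elapsed_time % cycle_time
--
--     # Distance for full cycles
--     distance = full_cycles * (speed * fly_time)
--
--     # Add distance for the remaining time if still flying
--     if remaining_time <= fly_time:
--         distance += speed * remaining_time
--     else:
--         distance += speed * fly_time
--
--     return distance
--
-- def simulateRace(reindeers, race_duration):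
--     # Initialize a dictionary to keep track of points
--     points = {i: 0 for i in range(len(reindeers))}
--
--     for t in range(1, race_duration + 1):
--         # Calculate distances at time t for all reindeer
--         distances = [calculateDistance(r[0], r[1], r[2], t) for r in reindeers]
--
--         # Find the maximum distance at this time
--         max_distance = max(distances)
--
--         # Award points to all reindeer that have the maximum distance
--         for i, dist in enumerate(distances):
--             if dist == max_distance:
--                 points[i] += 1
--
--     # Return the maximum points scored by any reindeer
--     return max(points.values())
-- ===== SOURCE B (Python) =====
-- def simulateRace(reindeers, race_duration):
--     ticks = range(1, race_duration + 1)
--     # one distance row per reindeer, computed from its travel pattern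
--     rows = [[(t // (f + r)) * s * f + s * min(t % (f + r), f) for t in ticks]
--             for s, f, r in reindeers]
--     best = 0
--     for i, ri in enumerate(rows):
--         # boolean mask of the seconds at which reindeer i is ahead of (or tied with) every rival
--         ok = [True] * len(ri)
--         for j, rj in enumerate(rows):
--             if j != i:
--                 ok = [o and b <= a for o, a, b in zip(ok, ri, rj)]
--         score = sum(ok)
--         if score > best:
--             best = score
--     return best
-- ===== Notes on version B (the rewrite author's own statement) =====
-- stated objective: alternative
-- what changed: Replaces A's per-second simulation (compute all distances each second, take their max, award points through an index dict) with a pairwise-domination count: B precomputes one distance row per reindeer, then for each reindeer intersects boolean not-beaten-by-rival masks pairwise and keeps the best mask count, so no per-second maximum and no points accumulator exist.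
import Mathlib
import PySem

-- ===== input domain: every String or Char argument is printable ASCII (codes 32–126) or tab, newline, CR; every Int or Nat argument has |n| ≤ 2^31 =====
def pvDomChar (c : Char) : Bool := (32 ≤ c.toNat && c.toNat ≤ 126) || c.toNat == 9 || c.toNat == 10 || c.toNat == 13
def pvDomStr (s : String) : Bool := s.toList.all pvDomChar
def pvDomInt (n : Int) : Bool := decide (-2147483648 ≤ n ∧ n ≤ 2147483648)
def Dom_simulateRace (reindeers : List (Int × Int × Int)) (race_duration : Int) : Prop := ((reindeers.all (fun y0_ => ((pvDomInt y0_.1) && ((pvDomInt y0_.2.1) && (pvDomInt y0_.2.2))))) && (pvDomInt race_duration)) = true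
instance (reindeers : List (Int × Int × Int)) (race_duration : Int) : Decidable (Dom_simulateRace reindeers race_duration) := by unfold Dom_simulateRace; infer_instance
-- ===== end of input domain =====

-- B replaces A's per-second leader simulation (distances, max, points dict) with a
-- pairwise-domination count per reindeer (alternative algorithm, same exact values; not faster).


-- ===== PORT A =====
def calculateDistance (speed fly_time rest_time elapsed_time : Int) : Int :=
  let cycle_time := fly_time + rest_time
  let full_cycles := PySem.Int.floordiv elapsed_time cycle_time
  let remaining_time := PySem.Int.mod elapsed_time cycle_time
  let distance := full_cycles * (speed * fly_time)
  if remaining_time ≤ fly_time then distance + speed * remaining_time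
  else distance + speed * fly_time

def simulateRace (reindeers : List (Int × Int × Int)) (race_duration : Int) : Int :=
  -- points = {i: 0 for i in range(len(reindeers))}
  let points : PySem.Dict Int Int :=
    (PySem.List.pyRange 0 (reindeers.length : Int) 1).foldl (fun d i => d.insert i 0) PySem.Dict.empty
  let points :=
    (PySem.List.pyRange 1 (race_duration + 1) 1).foldl (fun pts t =>
      let distances := reindeers.map (fun r => calculateDistance r.1 r.2.1 r.2.2 t)
      -- max(distances): Python raises ValueError on an empty list; Pre_ requires reindeers ≠ []
      let max_distance := (PySem.List.max? distances (fun x => x)).getD 0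
      (PySem.List.enumerate distances 0).foldl (fun pts p =>
        if p.2 == max_distance then pts.modify p.1 0 (· + 1) else pts) pts) points
  -- max(points.values()): nonempty since reindeers ≠ [] under Pre_
  (PySem.List.max? points.values (fun x => x)).getD 0

-- ===== PORT B =====
def simulateRace_alt (reindeers : List (Int × Int × Int)) (race_duration : Int) : Int :=
  let ticks := PySem.List.pyRange 1 (race_duration + 1) 1
  -- rows = [[(t // (f+r)) * s * f + s * min(t % (f+r), f) for t in ticks] for s, f, r in reindeers]
  let rows := reindeers.map (fun r =>
    ticks.map (fun t =>
      PySem.Int.floordiv t (r.2.1 + r.2.2) * r.1 * r.2.1 +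
        r.1 * min (PySem.Int.mod t (r.2.1 + r.2.2)) r.2.1))
  (PySem.List.enumerate rows 0).foldl (fun best p =>
    -- ok = [True]*len(ri); for j, rj: if j != i: ok = [o and b <= a for o, a, b in zip(ok, ri, rj)]
    let ok := (PySem.List.enumerate rows 0).foldl (fun ok q =>
      if q.1 != p.1 then
        (ok.zip (p.2.zip q.2)).map (fun z => z.1 && decide (z.2.2 ≤ z.2.1))
      else ok) (List.replicate p.2.length true)
    let score : Int := (ok.countP (fun b => b) : Int)
    if score > best then score else best) 0

-- ===== PRECONDITION & SPEC =====
-- A raises ValueError (max of an empty sequence) on an empty reindeer list and, when the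
-- per-second loop runs (race_duration > 0), ZeroDivisionError if some reindeer has
-- fly_time + rest_time = 0; Pre_ excludes exactly those.
def Pre_simulateRace (reindeers : List (Int × Int × Int)) (race_duration : Int) : Prop :=
  reindeers ≠ [] ∧ (race_duration ≤ 0 ∨ ∀ r ∈ reindeers, r.2.1 + r.2.2 ≠ 0)
instance (reindeers : List (Int × Int × Int)) (race_duration : Int) : Decidable (Pre_simulateRace reindeers race_duration) := by unfold Pre_simulateRace; infer_instance
def pvWitness_simulateRace : (List (Int × Int × Int)) × Int := ([(14, 10, 127), (16, 11, 162)], 20)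

def Spec_simulateRace (reindeers : List (Int × Int × Int)) (race_duration : Int) (out : Int) : Prop := out = simulateRace_alt reindeers race_duration
instance (reindeers : List (Int × Int × Int)) (race_duration : Int) (out : Int) : Decidable (Spec_simulateRace reindeers race_duration out) := by unfold Spec_simulateRace; infer_instance

-- ===== CLAIM (what is proved, stated in full; the proofs are below) =====
def Claim_equal_simulateRace : Prop := ∀ (reindeers : List (Int × Int × Int)) (race_duration : Int), Dom_simulateRace reindeers race_duration → Pre_simulateRace reindeers race_duration → Spec_simulateRace reindeers race_duration (simulateRace reindeers race_duration)

-- ===== LEMMAS AND PROOFS =====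

-- the closed-form distance both programs compute per (reindeer, second)
def distanceAt (r : Int × Int × Int) (t : Int) : Int :=
  let c := r.2.1 + r.2.2
  PySem.Int.floordiv t c * r.1 * r.2.1 + r.1 * min (PySem.Int.mod t c) r.2.1

-- the leading distance at second t (A's notion of the maximum distance)
def pvLead (rs : List (Int × Int × Int)) (t : Int) : Int :=
  (PySem.List.max? (rs.map (fun r => distanceAt r t)) (fun x => x)).getD 0

-- a reindeer's final score over the list of ticks
def pvScore (rs : List (Int × Int × Int)) (ts : List Int) (r : Int × Int × Int) : Int :=
  (ts.countP (fun t => distanceAt r t == pvLead rs t) : Int)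

-- A's per-second loop body, with calculateDistance rewritten to distanceAt
def pvStepA (rs : List (Int × Int × Int)) (pts : PySem.Dict Int Int) (t : Int) : PySem.Dict Int Int :=
  (PySem.List.enumerate (rs.map (fun r => distanceAt r t)) 0).foldl (fun pts p =>
    if p.2 == (PySem.List.max? (rs.map (fun r => distanceAt r t)) (fun x => x)).getD 0
    then pts.modify p.1 0 (· + 1) else pts) pts

def pvInit (n : Int) : PySem.Dict Int Int :=
  (PySem.List.pyRange 0 n 1).foldl (fun d i => d.insert i 0) PySem.Dict.empty

theorem calc_eq_distanceAt (r : Int × Int × Int) (t : Int) :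
    calculateDistance r.1 r.2.1 r.2.2 t = distanceAt r t := by
  simp only [calculateDistance, distanceAt, min_def]
  split_ifs <;> ring

theorem simulateRace_eq (rs : List (Int × Int × Int)) (d : Int) :
    simulateRace rs d =
      (PySem.List.max? ((PySem.List.pyRange 1 (d + 1) 1).foldl (pvStepA rs)
        (pvInit (rs.length : Int))).values (fun x => x)).getD 0 := by
  simp only [simulateRace, calc_eq_distanceAt]
  rfl

-- the index list whose multiplicity drives A's inner loop at second t
def pvKs (rs : List (Int × Int × Int)) (t : Int) : List Int :=
  (((PySem.List.enumerate (rs.map (fun r => distanceAt r t)) 0).filter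
    (fun p => p.2 == pvLead rs t)).map (fun p => p.1))

theorem stepA_as_modify_fold (rs : List (Int × Int × Int)) (d : PySem.Dict Int Int) (t : Int) :
    pvStepA rs d t = (pvKs rs t).foldl (fun pts i => pts.modify i 0 (· + 1)) d := by
  unfold pvStepA pvKs pvLead
  rw [PySem.List.foldl_if_eq_foldl_filter, List.foldl_map]

theorem stepA_getD (rs : List (Int × Int × Int)) (d : PySem.Dict Int Int) (t : Int) (j : Int) :
    (pvStepA rs d t).getD j 0 = d.getD j 0 + ((pvKs rs t).count j : Int) := by
  rw [stepA_as_modify_fold]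
  exact PySem.Dict.getD_foldl_modify_add_one _ _ _

theorem countP_enum_zero (l : List Int) (m : Int) (s j : Int) (h : j < s) :
    (PySem.List.enumerate l s).countP (fun p => (p.1 == j) && (p.2 == m)) = 0 := by
  rw [List.countP_eq_zero]
  intro p hp
  obtain ⟨k, hk, rfl⟩ := (PySem.List.mem_enumerate_iff _ _ _).1 hp
  simp only [Bool.and_eq_true, beq_iff_eq, not_and]
  intro hcontra
  omega

theorem countP_enum_core (l : List Int) (m : Int) (s : Int) (jn : Nat) (h : jn < l.length) :
    (PySem.List.enumerate l s).countP (fun p => (p.1 == s + (jn : Int)) && (p.2 == m))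
      = if l[jn] == m then 1 else 0 := by
  induction l generalizing s jn with
  | nil => simp at h
  | cons x xs ih =>
    rw [PySem.List.enumerate_cons, List.countP_cons]
    cases jn with
    | zero =>
      have htail := countP_enum_zero xs m (s + 1) s (by omega)
      simp only [Nat.cast_zero, add_zero]
      rw [htail]
      simp
    | succ k =>
      have hcast : s + ((k + 1 : Nat) : Int) = (s + 1) + (k : Int) := by push_cast; ring
      have ihk := ih (s + 1) k (by simpa using h)
      simp only [hcast]
      rw [ihk]
      have hne : ¬ (s = (s + 1) + (k : Int)) := by omega
      simp [hne]

theorem pvKs_count (rs : List (Int × Int × Int)) (t : Int) (jn : Nat) (h : jn < rs.length) :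
    ((pvKs rs t).count (jn : Int) : Int)
      = if distanceAt rs[jn] t == pvLead rs t then 1 else 0 := by
  unfold pvKs
  rw [List.count_eq_countP, List.countP_map, List.countP_filter]
  have hcomp : ((fun x => x == (jn : Int)) ∘ (fun p : Int × Int => p.1)) = fun p : Int × Int => (p.1 == (jn : Int)) := rfl
  rw [hcomp]
  have hlen : jn < (rs.map (fun r => distanceAt r t)).length := by simpa using h
  have := countP_enum_core (rs.map (fun r => distanceAt r t)) (pvLead rs t) 0 jn hlen
  simp only [zero_add] at this
  rw [this]
  simp [List.getElem_map]

theorem foldA_getD (ts : List Int) (rs : List (Int × Int × Int)) (d : PySem.Dict Int Int) (j : Int) :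
    (ts.foldl (pvStepA rs) d).getD j 0
      = d.getD j 0 + (ts.map (fun t => ((pvKs rs t).count j : Int))).sum := by
  induction ts generalizing d with
  | nil => simp
  | cons t ts ih =>
    simp only [List.foldl_cons, List.map_cons, List.sum_cons, ih, stepA_getD]
    ring

theorem init_getD_aux (l : List Int) (d : PySem.Dict Int Int) (h : ∀ j, d.getD j 0 = 0) :
    ∀ j, (l.foldl (fun d i => d.insert i 0) d).getD j 0 = 0 := by
  induction l generalizing d with
  | nil => exact h
  | cons x xs ih =>
    intro j
    simp only [List.foldl_cons]
    refine ih _ (fun j' => ?_) j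
    rw [PySem.Dict.getD_insert]
    split
    · rfl
    · exact h j'

theorem init_getD (n : Int) (j : Int) : (pvInit n).getD j 0 = 0 := by
  unfold pvInit
  exact init_getD_aux _ _ (fun j' => by simp) j

theorem init_keys (n : Int) : (pvInit n).keys = PySem.List.pyRange 0 n 1 := by
  unfold pvInit
  have hitems : ((PySem.List.pyRange 0 n 1).foldl (fun d i => d.insert i 0) PySem.Dict.empty).items
      = PySem.Dict.empty.items ++ (PySem.List.pyRange 0 n 1).map (fun i => (i, (0 : Int))) := by
    refine PySem.Dict.items_foldl_insert_fresh (k := fun a => a) (v := fun _ => 0) _ _ ?_ ?_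
    · intro a _; simp
    · simpa using PySem.List.nodup_pyRange_one (a := 0) (b := n)
  simp only [PySem.Dict.keys, hitems]
  have hcomp : ((fun x : Int × Int => x.1) ∘ fun i : Int => (i, (0 : Int))) = id := rfl
  simp [PySem.Dict.empty, hcomp]

theorem final_getD (rs : List (Int × Int × Int)) (ts : List Int) (jn : Nat) (h : jn < rs.length) :
    ((ts.foldl (pvStepA rs) (pvInit (rs.length : Int))).getD (jn : Int) 0)
      = pvScore rs ts rs[jn] := by
  rw [foldA_getD, init_getD, zero_add]
  have hmap : ts.map (fun t => ((pvKs rs t).count (jn : Int) : Int))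
      = ts.map (fun t => if distanceAt rs[jn] t == pvLead rs t then (1 : Int) else 0) :=
    List.map_congr_left (fun t _ => pvKs_count rs t jn h)
  rw [hmap]
  unfold pvScore
  exact PySem.List.sum_map_ite_one_zero _ _

theorem set_update_of_subset (s ks : List Int) (h : ∀ x ∈ ks, x ∈ s) :
    PySem.Set.update s ks = s := by
  induction ks generalizing s with
  | nil => rfl
  | cons x ks ih =>
    have hc : PySem.Set.add s x = s := by
      simp [PySem.Set.add, PySem.Set.contains, h x (by simp)]
    simp only [PySem.Set.update, List.foldl_cons] at *
    rw [hc]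
    exact ih s (fun y hy => h y (by simp [hy]))

theorem pvKs_subset (rs : List (Int × Int × Int)) (t : Int) :
    ∀ x ∈ pvKs rs t, x ∈ PySem.List.pyRange 0 (rs.length : Int) 1 := by
  intro x hx
  obtain ⟨p, hp, rfl⟩ := List.mem_map.1 hx
  have hp' := List.mem_of_mem_filter hp
  obtain ⟨k, hk, rfl⟩ := (PySem.List.mem_enumerate_iff _ _ _).1 hp'
  simp only [List.length_map] at hk
  simp [PySem.List.mem_pyRange_one]
  omega

theorem stepA_keys (rs : List (Int × Int × Int)) (d : PySem.Dict Int Int) (t : Int)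
    (h : d.keys = PySem.List.pyRange 0 (rs.length : Int) 1) :
    (pvStepA rs d t).keys = PySem.List.pyRange 0 (rs.length : Int) 1 := by
  rw [stepA_as_modify_fold]
  rw [PySem.Dict.keys_foldl_modify]
  rw [h]
  exact set_update_of_subset _ _ (pvKs_subset rs t)

theorem foldA_keys (ts : List Int) (rs : List (Int × Int × Int)) (d : PySem.Dict Int Int)
    (h : d.keys = PySem.List.pyRange 0 (rs.length : Int) 1) :
    (ts.foldl (pvStepA rs) d).keys = PySem.List.pyRange 0 (rs.length : Int) 1 := by
  induction ts generalizing d with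
  | nil => exact h
  | cons t ts ih => exact ih _ (stepA_keys rs d t h)

theorem final_values (rs : List (Int × Int × Int)) (ts : List Int) :
    ((ts.foldl (pvStepA rs) (pvInit (rs.length : Int))).values)
      = rs.map (fun r => pvScore rs ts r) := by
  have hk := foldA_keys ts rs (pvInit (rs.length : Int)) (init_keys _)
  have hnd : ((ts.foldl (pvStepA rs) (pvInit (rs.length : Int))).keys).Nodup := by
    rw [hk]; exact PySem.List.nodup_pyRange_one _ _
  rw [PySem.Dict.values_eq_map_keys _ hnd 0, hk]
  apply List.ext_getElem
  · simp [PySem.List.length_pyRange_one]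
  · intro k h1 h2
    have hklt : k < rs.length := by
      simpa [PySem.List.length_pyRange_one] using h1
    simp only [List.getElem_map, PySem.List.getElem_pyRange_one, zero_add]
    exact final_getD rs ts k hklt

-- ===== B-side lemmas =====

theorem le_foldl_max (l : List Int) (a : Int) : a ≤ l.foldl max a := by
  induction l generalizing a with
  | nil => simp
  | cons x xs ih => exact le_trans (le_max_left a x) (ih (max a x))

theorem mem_le_foldl_max (l : List Int) (a x : Int) (hx : x ∈ l) : x ≤ l.foldl max a := by
  induction l generalizing a with
  | nil => simp at hx
  | cons y ys ih =>
    rcases List.mem_cons.1 hx with rfl | h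
    · exact le_trans (le_max_right a x) (le_foldl_max ys (max a x))
    · exact ih (max a y) h

theorem foldl_max_cases (l : List Int) (a : Int) : l.foldl max a = a ∨ l.foldl max a ∈ l := by
  induction l generalizing a with
  | nil => exact Or.inl rfl
  | cons x xs ih =>
    rcases ih (max a x) with h | h
    · rcases max_cases a x with ⟨he, _⟩ | ⟨he, _⟩
      · exact Or.inl (by rw [List.foldl_cons, h, he])
      · exact Or.inr (by rw [List.foldl_cons, h, he]; simp)
    · exact Or.inr (List.mem_cons_of_mem _ h)

-- x ∈ l equals the running maximum of l iff x dominates every element of l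
theorem beq_max_eq_all (l : List Int) (x : Int) (hx : x ∈ l) :
    (x == (PySem.List.max? l (fun y => y)).getD 0) = l.all (fun y => decide (y ≤ x)) := by
  obtain ⟨h, tl, rfl⟩ := List.exists_cons_of_ne_nil (List.ne_nil_of_mem hx)
  rw [PySem.List.max?_id_cons, Option.getD_some]
  have hub : ∀ y ∈ h :: tl, y ≤ tl.foldl max h := by
    intro y hy
    rcases List.mem_cons.1 hy with rfl | hy'
    · exact le_foldl_max tl y
    · exact mem_le_foldl_max tl h y hy'
  have hmem : tl.foldl max h ∈ h :: tl := by
    rcases foldl_max_cases tl h with hc | hc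
    · rw [hc]; simp
    · exact List.mem_cons_of_mem _ hc
  rw [Bool.eq_iff_iff]
  simp only [beq_iff_eq, List.all_eq_true, decide_eq_true_eq]
  constructor
  · intro he y hy
    rw [he]; exact hub y hy
  · intro hall
    have h1 : tl.foldl max h ≤ x := hall _ hmem
    have h2 : x ≤ tl.foldl max h := hub x hx
    omega

-- B's per-reindeer count is A's score for a reindeer in the list
theorem scoreB_eq_score (rs : List (Int × Int × Int)) (ts : List Int) (r : Int × Int × Int)
    (hr : r ∈ rs) :
    ((ts.countP (fun t => rs.all (fun q => decide (distanceAt q t ≤ distanceAt r t))) : Nat) : Int)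
      = pvScore rs ts r := by
  unfold pvScore
  congr 1
  apply List.countP_congr
  intro t _
  have hx : distanceAt r t ∈ rs.map (fun q => distanceAt q t) := List.mem_map_of_mem hr
  have hbe := beq_max_eq_all (rs.map (fun q => distanceAt q t)) (distanceAt r t) hx
  rw [List.all_map] at hbe
  unfold pvLead
  rw [show ((fun y => decide (y ≤ distanceAt r t)) ∘ fun q => distanceAt q t)
      = (fun q => decide (distanceAt q t ≤ distanceAt r t)) from rfl] at hbe
  rw [← hbe]

theorem foldl_if_gt_eq_foldl_max (l : List Int) (a : Int) :
    l.foldl (fun b s => if s > b then s else b) a = l.foldl max a := by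
  induction l generalizing a with
  | nil => rfl
  | cons x xs ih =>
    have : (if x > a then x else a) = max a x := by
      rcases le_or_gt x a with h | h
      · rw [max_eq_left h, if_neg (by omega)]
      · rw [max_eq_right (le_of_lt h), if_pos h]
    simp only [List.foldl_cons, this, ih]

def pvRowOf (ts : List Int) (r : Int × Int × Int) : List Int := ts.map (fun t => distanceAt r t)

theorem enumerate_map {α β : Type} (l : List α) (f : α → β) (s : Int) :
    PySem.List.enumerate (l.map f) s = (PySem.List.enumerate l s).map (fun p => (p.1, f p.2)) := by
  induction l generalizing s with
  | nil => rfl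
  | cons x xs ih => simp only [List.map_cons, PySem.List.enumerate_cons, ih]

theorem mapzip (ts : List Int) (g : Int → Bool) (fi fj : Int → Int) :
    ((ts.map g).zip ((ts.map fi).zip (ts.map fj))).map (fun z => z.1 && decide (z.2.2 ≤ z.2.1))
      = ts.map (fun t => g t && decide (fj t ≤ fi t)) := by
  induction ts with
  | nil => rfl
  | cons t ts ih =>
    rw [List.map_cons, List.map_cons, List.map_cons, List.zip_cons_cons, List.zip_cons_cons,
      List.map_cons, ih, List.map_cons]

theorem replicate_eq_map_true (ts : List Int) : List.replicate ts.length true = ts.map (fun _ => true) := by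
  induction ts with
  | nil => rfl
  | cons t ts ih => rw [List.length_cons, List.replicate_succ, ih, List.map_cons]

theorem fold_ok (M : List (Int × (Int × Int × Int))) (ts : List Int) (i : Int)
    (ri : Int × Int × Int) (g : Int → Bool) :
    (M.map (fun m => (m.1, ts.map (fun t => distanceAt m.2 t)))).foldl
      (fun ok q => if q.1 != i then
          ((ok.zip ((ts.map (fun t => distanceAt ri t)).zip q.2)).map
            (fun z => z.1 && decide (z.2.2 ≤ z.2.1)))
        else ok) (ts.map g)
    = ts.map (fun t => g t && M.all (fun m => (m.1 == i) || decide (distanceAt m.2 t ≤ distanceAt ri t))) := by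
  induction M generalizing g with
  | nil => simp
  | cons m M ih =>
    simp only [List.map_cons, List.foldl_cons]
    by_cases hmi : m.1 = i
    · rw [if_neg (by simp [hmi])]
      rw [ih]
      apply List.map_congr_left
      intro t _
      have hb : (m.1 == i) = true := by simp [hmi]
      simp only [List.all_cons, hb, Bool.true_or, Bool.true_and]
    · rw [if_pos (by simp [hmi])]
      rw [mapzip, ih]
      apply List.map_congr_left
      intro t _
      have hb : (m.1 == i) = false := by simp [hmi]
      simp only [List.all_cons, hb, Bool.false_or, Bool.and_assoc]

theorem all_enum_skip {α : Type} (l : List α) (s i : Int) (C : α → Bool)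
    (h : ∀ (k : Nat) (hk : k < l.length), s + (k : Int) = i → C l[k] = true) :
    (PySem.List.enumerate l s).all (fun p => (p.1 == i) || C p.2) = l.all C := by
  induction l generalizing s with
  | nil => rfl
  | cons x xs ih =>
    rw [PySem.List.enumerate_cons]
    simp only [List.all_cons]
    have htail := ih (s + 1) (fun k hk hik => by
      have := h (k + 1) (by simpa using Nat.succ_lt_succ hk) (by push_cast; omega)
      simpa using this)
    rw [htail]
    by_cases hsi : s = i
    · have hx : C x = true := by simpa using h 0 (by simp) (by simpa using hsi)
      have hb : (s == i) = true := by simp [hsi]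
      rw [hb, hx]
      simp
    · have hb : (s == i) = false := by simp [hsi]
      rw [hb]
      simp

theorem foldl_enumerate_snd {α β : Type} (l : List α) (s : Int) (G : β → α → β) (a : β) :
    (PySem.List.enumerate l s).foldl (fun b p => G b p.2) a = l.foldl G a := by
  induction l generalizing s a with
  | nil => rfl
  | cons x xs ih => rw [PySem.List.enumerate_cons]; simp only [List.foldl_cons]; exact ih (s + 1) (G a x)

theorem score_eq (rs : List (Int × Int × Int)) (ts : List Int)
    (m : Int × (Int × Int × Int)) (hm : m ∈ PySem.List.enumerate rs 0) :
    ((((PySem.List.enumerate rs 0).map (fun p => (p.1, pvRowOf ts p.2))).foldl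
        (fun ok q => if q.1 != m.1 then
            ((ok.zip ((pvRowOf ts m.2).zip q.2)).map
              (fun z => z.1 && decide (z.2.2 ≤ z.2.1)))
          else ok)
        (List.replicate (pvRowOf ts m.2).length true)).countP (fun b => b) : Int)
      = pvScore rs ts m.2 := by
  obtain ⟨k0, hk0, hmk⟩ := (PySem.List.mem_enumerate_iff _ _ _).1 hm
  simp only [pvRowOf, List.length_map]
  rw [replicate_eq_map_true, fold_ok]
  have hall : ∀ t : Int,
      ((PySem.List.enumerate rs 0).all
        (fun p => (p.1 == m.1) || decide (distanceAt p.2 t ≤ distanceAt m.2 t)))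
      = rs.all (fun q => decide (distanceAt q t ≤ distanceAt m.2 t)) := by
    intro t
    apply all_enum_skip rs 0 m.1 (fun q => decide (distanceAt q t ≤ distanceAt m.2 t))
    intro k hk hik
    have hkk : k = k0 := by
      have : (k : Int) = (k0 : Int) := by rw [hmk] at hik; simpa using hik
      exact_mod_cast this
    subst hkk
    have : m.2 = rs[k] := by rw [hmk]
    rw [← this]
    simp
  have hfun : (fun t => true && (PySem.List.enumerate rs 0).all
        (fun p => (p.1 == m.1) || decide (distanceAt p.2 t ≤ distanceAt m.2 t)))
      = fun t => rs.all (fun q => decide (distanceAt q t ≤ distanceAt m.2 t)) := by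
    funext t
    rw [Bool.true_and, hall t]
  rw [hfun, List.countP_map]
  exact scoreB_eq_score rs ts m.2 (by rw [hmk]; exact List.getElem_mem hk0)

theorem alt_eq (rs : List (Int × Int × Int)) (d : Int) (hne : rs ≠ []) :
    simulateRace_alt rs d
      = (PySem.List.max? (rs.map (fun r => pvScore rs (PySem.List.pyRange 1 (d + 1) 1) r))
          (fun x => x)).getD 0 := by
  obtain ⟨r0, rest, rfl⟩ := List.exists_cons_of_ne_nil hne
  show (PySem.List.enumerate ((r0 :: rest).map (pvRowOf (PySem.List.pyRange 1 (d + 1) 1))) 0).foldl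
      (fun best p =>
        let ok := (PySem.List.enumerate ((r0 :: rest).map (pvRowOf (PySem.List.pyRange 1 (d + 1) 1))) 0).foldl
          (fun ok q => if q.1 != p.1 then
              ((ok.zip (p.2.zip q.2)).map (fun z => z.1 && decide (z.2.2 ≤ z.2.1)))
            else ok) (List.replicate p.2.length true)
        let score : Int := (ok.countP (fun b => b) : Int)
        if score > best then score else best) 0 = _
  rw [enumerate_map ((r0 :: rest)) (pvRowOf (PySem.List.pyRange 1 (d + 1) 1)) 0, List.foldl_map]
  have h1 : ((PySem.List.enumerate (r0 :: rest) 0).foldl (fun best m =>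
        let ok := ((PySem.List.enumerate (r0 :: rest) 0).map
            (fun p => (p.1, pvRowOf (PySem.List.pyRange 1 (d + 1) 1) p.2))).foldl
          (fun ok q => if q.1 != m.1 then
              ((ok.zip ((pvRowOf (PySem.List.pyRange 1 (d + 1) 1) m.2).zip q.2)).map
                (fun z => z.1 && decide (z.2.2 ≤ z.2.1)))
            else ok)
          (List.replicate (pvRowOf (PySem.List.pyRange 1 (d + 1) 1) m.2).length true)
        let score : Int := (ok.countP (fun b => b) : Int)
        if score > best then score else best) 0)
      = ((PySem.List.enumerate (r0 :: rest) 0).foldl (fun best m =>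
          let sc := pvScore (r0 :: rest) (PySem.List.pyRange 1 (d + 1) 1) m.2
          if sc > best then sc else best) 0) := by
    apply PySem.List.foldl_congr_mem
    intro b m hm
    simp only [score_eq (r0 :: rest) (PySem.List.pyRange 1 (d + 1) 1) m hm]
  rw [h1]
  have h3 : ((PySem.List.enumerate (r0 :: rest) 0).foldl (fun best m =>
        let sc := pvScore (r0 :: rest) (PySem.List.pyRange 1 (d + 1) 1) m.2
        if sc > best then sc else best) 0)
      = (r0 :: rest).foldl (fun best r =>
          let sc := pvScore (r0 :: rest) (PySem.List.pyRange 1 (d + 1) 1) r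
          if sc > best then sc else best) 0 :=
    foldl_enumerate_snd (r0 :: rest) 0
      (fun best r =>
        let sc := pvScore (r0 :: rest) (PySem.List.pyRange 1 (d + 1) 1) r
        if sc > best then sc else best) 0
  rw [h3]
  have h2 : (r0 :: rest).foldl (fun best r =>
      let sc := pvScore (r0 :: rest) (PySem.List.pyRange 1 (d + 1) 1) r
      if sc > best then sc else best) 0
    = ((r0 :: rest).map (fun r => pvScore (r0 :: rest) (PySem.List.pyRange 1 (d + 1) 1) r)).foldl
        (fun b s => if s > b then s else b) 0 := by rw [List.foldl_map]
  rw [h2, foldl_if_gt_eq_foldl_max]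
  rw [List.map_cons, List.foldl_cons, PySem.List.max?_id_cons, Option.getD_some]
  have h0 : max 0 (pvScore (r0 :: rest) (PySem.List.pyRange 1 (d + 1) 1) r0)
      = pvScore (r0 :: rest) (PySem.List.pyRange 1 (d + 1) 1) r0 := by
    apply max_eq_right
    unfold pvScore
    positivity
  rw [h0]

-- ===== VERDICT (by name: the statement is the Claim_ definition above) =====
theorem simulateRace_spec : Claim_equal_simulateRace := by
  intro rs d _ hpre
  unfold Spec_simulateRace
  rw [alt_eq rs d hpre.1, simulateRace_eq, final_values]
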